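-- pv_equiv track=rewrite | github.com/LeohangRai/PythonNotesJupyter | fbchat library/Echobot.py | memefy
-- ===== SOURCE A (Python) =====
-- def memefy(sentence):
--         #Splitting the sentence into words
--         words = sentence.split()
--         new_words = []
--
--         for word in words:
--
--             each_word_letter_list = []
--             for letter in word:
--                 each_word_letter_list.append(letter)
--
--
--             each_word_replaced_letters = []
--             for letter in each_word_letter_list:
--                 if letter != 'a' and letter != 's' and letter != 'h' and letter != 'o':
--                     letter = letter
--                 elif letter == 'a':
--                     letter = '@'
--                 elif letter == 's':
--                     letter = '$'
--                 elif letter == 'h':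
--                     letter = '#'
--                 elif letter == 'o':
--                     letter = '0'
--                 each_word_replaced_letters.append(letter)
--
--             new_word = "".join(each_word_replaced_letters)
--             new_words.append(new_word)
--
--         try:
--             #Capitalizing the 4th word of the sentence
--             new_words[3] = new_words[3].upper()
--
--             #Memefying the sixth word of the sentence
--             sixth_word_letters = [i for i in new_words[5]]
--             index = 0
--             mem_sixth= []
--
--             while index < len(sixth_word_letters):
--                 if index % 2 == 0:
--                     mem_sixth.append(sixth_word_letters[index])
--                 else:
--                     mem_sixth.append(sixth_word_letters[index].upper())
--                 index += 1
--             sixth_word = "".join(mem_sixth)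
--             new_words[5] = sixth_word
--
--         except:
--             pass
--
--         memefied = " ".join(new_words)
--         return memefied
-- ===== SOURCE B (Python) =====
-- _TABLE = str.maketrans("asho", "@$#0")
--
-- def _zigzag(s):
--     # alternate case, two characters at a time, recursively
--     if len(s) < 2:
--         return s
--     return s[:1] + s[1].upper() + _zigzag(s[2:])
--
-- def memefy(sentence):
--     # one global letter-replacement pass over the raw sentence, then split
--     words = sentence.translate(_TABLE).split()
--     if len(words) > 3:
--         words[3] = words[3].upper()
--     if len(words) > 5:
--         words[5] = _zigzag(words[5])
--     return " ".join(words)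
-- ===== Notes on version B (the rewrite author's own statement) =====
-- stated objective: alternative
-- what changed: B translates the whole raw sentence in one global str.translate pass before splitting (A translates per word with three Python-level accumulator loops), replaces the try/except build-then-patch with explicit length-guarded assignments, and alternates the 6th word's case by a two-characters-at-a-time recursion instead of A's index-parity while loop.
import Mathlib
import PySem

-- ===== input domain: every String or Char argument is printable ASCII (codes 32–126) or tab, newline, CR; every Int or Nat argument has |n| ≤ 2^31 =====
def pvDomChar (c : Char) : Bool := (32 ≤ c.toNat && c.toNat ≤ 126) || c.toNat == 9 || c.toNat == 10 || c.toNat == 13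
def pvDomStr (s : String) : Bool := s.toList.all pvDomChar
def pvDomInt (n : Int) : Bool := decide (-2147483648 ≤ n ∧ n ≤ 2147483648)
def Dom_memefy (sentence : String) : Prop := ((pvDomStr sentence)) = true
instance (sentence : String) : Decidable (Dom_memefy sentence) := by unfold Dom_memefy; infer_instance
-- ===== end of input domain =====

-- B translates the whole sentence globally BEFORE splitting, patches words 3/5 under
-- explicit length guards (no try/except) and alternates case by a two-at-a-time
-- recursion instead of an index-parity loop; objective: alternative, same return value.

-- ===== PORT A =====
-- the if/elif chain of A, letter by letter
def memefyReplace (letter : Char) : Char :=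
  if letter ≠ 'a' ∧ letter ≠ 's' ∧ letter ≠ 'h' ∧ letter ≠ 'o' then letter
  else if letter = 'a' then '@'
  else if letter = 's' then '$'
  else if letter = 'h' then '#'
  else if letter = 'o' then '0'
  else letter

-- the 'while index < len(sixth_word_letters)' loop of A
def memefySixthLoop (letters : List Char) (index : Nat) (acc : List Char) : List Char :=
  if index < letters.length then
    memefySixthLoop letters (index + 1)
      (acc ++ [if index % 2 = 0 then letters.getD index ' '
               else PySem.Chars.upperChar (letters.getD index ' ')])
  else acc
termination_by letters.length - index

def memefy (sentence : String) : String :=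
  let words := PySem.Str.split₀ sentence
  let new_words := words.foldl (fun acc word =>
    let each_word_letter_list := word.toList.foldl (fun l c => l ++ [c]) []
    let each_word_replaced_letters :=
      each_word_letter_list.foldl (fun l c => l ++ [memefyReplace c]) []
    acc ++ [String.ofList each_word_replaced_letters]) []
  -- the try block: each pyGet? 'none' is the IndexError that aborts the rest of it
  let new_words2 :=
    match PySem.List.pyGet? new_words 3 with
    | none => new_words
    | some w3 =>
      let nw := new_words.set 3 (PySem.Str.upper w3)
      match PySem.List.pyGet? nw 5 with
      | none => nw
      | some w5 => nw.set 5 (String.ofList (memefySixthLoop w5.toList 0 []))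
  PySem.Str.join " " new_words2

-- ===== PORT B =====
-- str.maketrans("asho", "@$#0") as a character map (Source B's _TABLE)
def memefyTable (c : Char) : Char :=
  if c = 'a' then '@'
  else if c = 's' then '$'
  else if c = 'h' then '#'
  else if c = 'o' then '0'
  else c

-- Source B's _zigzag: s[:1] + s[1].upper() + _zigzag(s[2:]), two chars at a time
def memefyZigzag : List Char → List Char
  | [] => []
  | [c] => [c]
  | a :: b :: rest => a :: PySem.Chars.upperChar b :: memefyZigzag rest

def memefy_alt (sentence : String) : String :=
  -- sentence.translate(_TABLE).split()
  let words := PySem.Str.split₀ (String.ofList (sentence.toList.map memefyTable))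
  -- if len(words) > 3: words[3] = words[3].upper()
  let words1 := if 3 < words.length
    then words.set 3 (PySem.Str.upper (words.getD 3 "")) else words
  -- if len(words) > 5: words[5] = _zigzag(words[5])
  let words2 := if 5 < words1.length
    then words1.set 5 (String.ofList (memefyZigzag (words1.getD 5 "").toList)) else words1
  PySem.Str.join " " words2

-- ===== PRECONDITION & SPEC =====
def Spec_memefy (sentence : String) (out : String) : Prop := out = memefy_alt sentence
instance (sentence : String) (out : String) : Decidable (Spec_memefy sentence out) := by unfold Spec_memefy; infer_instance

-- ===== CLAIM =====
def Claim_equal_memefy : Prop := ∀ (sentence : String), Dom_memefy sentence → Spec_memefy sentence (memefy sentence)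

-- ===== LEMMAS AND PROOFS =====

theorem memefyReplace_eq (c : Char) : memefyReplace c = memefyTable c := by
  unfold memefyReplace memefyTable
  split_ifs <;> simp_all

theorem memefyTable_isspace (c : Char) :
    PySem.Chars.isspace (memefyTable c) = PySem.Chars.isspace c := by
  unfold memefyTable
  split_ifs with h1 h2 h3 h4 <;> subst_vars <;> rfl

-- the per-character transform applied at the index parity (proof-side shorthand)
def memefyStyleF (p : Int × Char) : Char :=
  if PySem.Int.mod p.1 2 ≠ 0 then PySem.Chars.upperChar p.2 else p.2

theorem memefySixthLoop_eq (letters : List Char) (index : Nat) (acc : List Char) :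
    memefySixthLoop letters index acc =
      acc ++ ((PySem.List.enumerate (letters.drop index) (index : Int)).map memefyStyleF) := by
  by_cases h : index < letters.length
  · rw [memefySixthLoop, if_pos h]
    rw [memefySixthLoop_eq letters (index + 1)]
    rw [List.drop_eq_getElem_cons h, PySem.List.enumerate_cons]
    have hm : PySem.Int.mod (index : Int) 2 = ((index % 2 : Nat) : Int) := by
      exact_mod_cast PySem.Int.mod_natCast index 2
    rcases Nat.even_or_odd index with he | ho
    · have h0 : index % 2 = 0 := Nat.even_iff.mp he
      have h0' : (index : Int) % 2 = 0 := by omega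
      simp [memefyStyleF, h0, h0', List.getElem?_eq_getElem h, List.append_assoc]
    · have h1 : index % 2 = 1 := Nat.odd_iff.mp ho
      have h1' : (index : Int) % 2 = 1 := by omega
      simp [memefyStyleF, h1, h1', List.getElem?_eq_getElem h, List.append_assoc]
  · rw [memefySixthLoop, if_neg h]
    simp [List.drop_eq_nil_of_le (Nat.le_of_not_lt h)]
termination_by letters.length - index

theorem memefyZigzag_eq (cs : List Char) (k : Nat) :
    (PySem.List.enumerate cs ((2 * k : Nat) : Int)).map memefyStyleF = memefyZigzag cs := by
  match cs with
  | [] => simp [PySem.List.enumerate, memefyZigzag]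
  | [c] =>
    simp [PySem.List.enumerate, memefyZigzag, memefyStyleF]
  | a :: b :: rest =>
    have ih := memefyZigzag_eq rest (k + 1)
    rw [PySem.List.enumerate_cons, PySem.List.enumerate_cons]
    have e1 : ((2 * k : Nat) : Int) + 1 = ((2 * k + 1 : Nat) : Int) := by push_cast; ring
    have e2 : ((2 * k + 1 : Nat) : Int) + 1 = ((2 * (k + 1) : Nat) : Int) := by push_cast; ring
    rw [e1, e2, List.map_cons, List.map_cons, ih]
    simp [memefyZigzag, memefyStyleF]

-- Source B's word-level effect of the global translate (proof-side shorthand)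
def memefyRepl (w : String) : String := String.ofList (w.toList.map memefyTable)

-- the character-level split commutes with a whitespace-preserving character map
theorem split₀_go_map (s cur : List Char) (acc : List (List Char)) :
    PySem.Chars.split₀.go (s.map memefyTable) (cur.map memefyTable)
        (acc.map (List.map memefyTable))
      = (PySem.Chars.split₀.go s cur acc).map (List.map memefyTable) := by
  induction s generalizing cur acc with
  | nil =>
    by_cases h : cur.isEmpty
    · simp [PySem.Chars.split₀.go, List.isEmpty_iff.mp h]
    · have h' : cur ≠ [] := by simpa [List.isEmpty_iff] using h
      simp [PySem.Chars.split₀.go, h', List.map_reverse]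
  | cons c rest ih =>
    simp only [List.map_cons, PySem.Chars.split₀.go, memefyTable_isspace]
    by_cases hs : PySem.Chars.isspace c
    · by_cases h : cur.isEmpty
      · have h2 : (cur.map memefyTable).isEmpty = true := by simp_all [List.isEmpty_iff]
        simp only [hs, h, h2, if_true]
        exact ih [] acc
      · have h2 : (cur.map memefyTable).isEmpty = false := by simp_all [List.isEmpty_iff]
        simp only [hs, if_true, h, h2, if_false, Bool.false_eq_true]
        have := ih [] ((cur.reverse :: acc))
        simpa using this
    · simp only [hs, if_false, Bool.false_eq_true]
      have := ih (c :: cur) acc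
      simpa using this

theorem split₀_map (l : List Char) :
    PySem.Chars.split₀ (l.map memefyTable)
      = (PySem.Chars.split₀ l).map (List.map memefyTable) := by
  have := split₀_go_map l [] []
  simpa [PySem.Chars.split₀] using this

-- B's split-of-translated-sentence is wordwise translation of A's split
theorem split₀_translate (sentence : String) :
    PySem.Str.split₀ (String.ofList (sentence.toList.map memefyTable))
      = (PySem.Str.split₀ sentence).map memefyRepl := by
  simp [PySem.Str.split₀, split₀_map, memefyRepl, Function.comp]

-- A's patch phase equals B's guarded patch phase, on any word list
theorem memefy_patch_eq (nws : List String) :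
    (match PySem.List.pyGet? nws 3 with
     | none => nws
     | some w3 =>
       let nw := nws.set 3 (PySem.Str.upper w3)
       match PySem.List.pyGet? nw 5 with
       | none => nw
       | some w5 => nw.set 5 (String.ofList (memefySixthLoop w5.toList 0 []))) =
    (let ws1 := if 3 < nws.length
       then nws.set 3 (PySem.Str.upper (nws.getD 3 "")) else nws
     if 5 < ws1.length
       then ws1.set 5 (String.ofList (memefyZigzag (ws1.getD 5 "").toList)) else ws1) := by
  have h3c : PySem.List.pyGet? nws (3 : Int) = nws[3]? := by
    exact_mod_cast PySem.List.pyGet?_natCast nws 3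
  rw [h3c]
  by_cases h3 : 3 < nws.length
  · have e3 : nws[3]? = some nws[3] := List.getElem?_eq_getElem h3
    have g3 : nws.getD 3 "" = nws[3] := by simp [List.getD, e3]
    rw [e3]
    dsimp only
    have h5c : PySem.List.pyGet? (nws.set 3 (PySem.Str.upper nws[3])) (5 : Int)
        = (nws.set 3 (PySem.Str.upper nws[3]))[5]? := by
      exact_mod_cast PySem.List.pyGet?_natCast (nws.set 3 (PySem.Str.upper nws[3])) 5
    rw [h5c]
    by_cases h5 : 5 < nws.length
    · have e5 : (nws.set 3 (PySem.Str.upper nws[3]))[5]? = some nws[5] := by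
        rw [List.getElem?_set_ne (by norm_num)]
        exact List.getElem?_eq_getElem h5
      rw [e5]
      dsimp only
      rw [if_pos h3, g3, if_pos (by simpa using h5)]
      have g5 : (nws.set 3 (PySem.Str.upper nws[3])).getD 5 "" = nws[5] := by
        simp [List.getD, e5]
      rw [g5]
      have hz : memefySixthLoop (nws[5]).toList 0 [] = memefyZigzag (nws[5]).toList := by
        rw [memefySixthLoop_eq]
        simpa using memefyZigzag_eq (nws[5]).toList 0
      rw [hz]
    · have e5 : (nws.set 3 (PySem.Str.upper nws[3]))[5]? = none := by
        rw [List.getElem?_eq_none]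
        simp
        omega
      rw [e5]
      dsimp only
      rw [if_pos h3, g3, if_neg (by simpa using h5)]
  · have e3 : nws[3]? = none := by rw [List.getElem?_eq_none]; omega
    rw [e3]
    dsimp only
    rw [if_neg h3, if_neg (by omega)]

-- ===== VERDICT =====
theorem memefy_spec : Claim_equal_memefy := by
  intro sentence _
  unfold Spec_memefy memefy memefy_alt
  dsimp only
  have hA : (PySem.Str.split₀ sentence).foldl (fun acc word => acc ++
      [String.ofList ((word.toList.foldl (fun l c => l ++ [c]) []).foldl
        (fun l c => l ++ [memefyReplace c]) [])]) [] =
      (PySem.Str.split₀ sentence).map memefyRepl := by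
    rw [PySem.List.foldl_append_singleton_eq_map]
    refine List.map_congr_left fun w _ => ?_
    rw [PySem.List.foldl_append_singleton_eq_map (fun c => c), List.nil_append, List.map_id',
      PySem.List.foldl_append_singleton_eq_map memefyReplace, List.nil_append]
    rw [show memefyReplace = memefyTable from funext memefyReplace_eq]
    rfl
  rw [hA, split₀_translate]
  exact congrArg (PySem.Str.join " ") (memefy_patch_eq _)
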